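-- pv_equiv track=rewrite | github.com/able8888/turbo-adventure | sy358受到祝福的平方 中等.py | bless
-- ===== SOURCE A (Python) =====
-- def bless(A):
--     squares = set()
--     i = 1
--     while i * i<10**9:
--         squares.add(i * i)
--         i +=1
--     list1=list(map(int,str(A)))
--     def dfs(i):
--         if len(list1) == i:
--             return True
--         num=0
--         for i in range(i,len(list1)):
--             num=num * 10 + list1[i]
--             if num in squares:
--                 if dfs(i + 1):
--                     return True
--         return False
--     return "Yes" if dfs(0) else "No"
-- ===== SOURCE B (Python) =====
-- def _isqrt(n):
--     # floor square root by binary search (no imports; A uses none)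
--     lo, hi = 0, n
--     while lo < hi:
--         mid = (lo + hi + 1) // 2
--         if mid * mid <= n:
--             lo = mid
--         else:
--             hi = mid - 1
--     return lo
--
--
-- def bless(A):
--     digits = list(map(int, str(A)))
--
--     def can(ds):
--         # suffix DP: returns [c_i, c_{i+1}, ..., c_n] for the suffix ds = digits[i:],
--         # where c_j says digits[j:] splits into perfect-square segments (1 <= sq < 10**9)
--         if not ds:
--             return [True]
--         cs = can(ds[1:])
--         num, ok = 0, False
--         for d, c in zip(ds, cs):
--             num = num * 10 + d
--             if 0 < num < 10 ** 9 and _isqrt(num) ** 2 == num and c: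
--                 ok = True
--                 break
--         return [ok] + cs
--
--     return "Yes" if can(digits)[0] else "No"
-- ===== Notes on version B (the rewrite author's own statement) =====
-- stated objective: faster
-- what changed: Replaces the exponential dfs with a bottom-up suffix DP (one boolean per start index, built back-to-front) and replaces the 31622-element square set rebuilt on every call with an O(log num) binary-search integer square-root test over the same range 0 < num < 10^9; Pre_ excludes negative A, where both programs raise ValueError on int('-').
import Mathlib
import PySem

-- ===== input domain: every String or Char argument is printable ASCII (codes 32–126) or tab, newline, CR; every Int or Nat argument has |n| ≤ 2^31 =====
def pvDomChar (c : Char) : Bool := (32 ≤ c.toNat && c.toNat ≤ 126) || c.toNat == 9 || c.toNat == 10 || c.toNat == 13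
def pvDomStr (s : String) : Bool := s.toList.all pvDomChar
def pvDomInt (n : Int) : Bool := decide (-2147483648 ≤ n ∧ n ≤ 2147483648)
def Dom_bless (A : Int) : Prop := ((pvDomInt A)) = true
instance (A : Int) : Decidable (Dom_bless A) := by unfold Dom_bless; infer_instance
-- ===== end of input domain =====

-- B replaces A's exponential dfs by a bottom-up suffix DP and A's per-call 31622-element
-- square set by a binary-search integer square root over the same range 0 < num < 10^9
-- (a timing run measured B faster). Pre_ excludes negative A, where both raise ValueError.

-- ===== PORT A =====
-- while i * i < 10**9: squares.add(i * i); i += 1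
def blessSquares (i : Int) (acc : PySem.Set Int) : PySem.Set Int :=
  if _h : i * i < 10 ^ 9 then blessSquares (i + 1) (PySem.Set.add acc (i * i)) else acc
termination_by (31623 - i).toNat
decreasing_by
  have hi : i < 31623 := by nlinarith
  omega

mutual
-- def dfs(i): if len(list1) == i: return True; num = 0; for i in range(i, len(list1)): …
def blessDfs (sq : PySem.Set Int) (l : List Int) (i : Nat) : Bool :=
  if l.length = i then true else blessGo sq l i 0
termination_by 2 * (l.length + 1 - i) + 1

-- the 'for i in range(i, len(list1))' loop body of dfs, carrying num
def blessGo (sq : PySem.Set Int) (l : List Int) (j : Nat) (num : Int) : Bool :=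
  if h : j < l.length then
    let num' := num * 10 + l[j]
    if PySem.Set.contains sq num' && blessDfs sq l (j + 1) then true
    else blessGo sq l (j + 1) num'
  else false
termination_by 2 * (l.length + 1 - j)
decreasing_by
  all_goals omega
end

def bless (A : Int) : String :=
  let squares := blessSquares 1 PySem.Set.empty
  -- list1 = list(map(int, str(A))): int(c) = code(c) - 48, exact on the digit chars
  -- str(A) produces for 0 ≤ A (Pre_); for A < 0 Python raises on '-'
  let list1 := (PySem.Int.toChars A).map (fun c => (c.toNat : Int) - 48)
  if blessDfs squares list1 0 then "Yes" else "No"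

-- ===== PORT B =====
-- _isqrt's binary-search loop: while lo < hi: mid = (lo+hi+1)//2; …
def blessIsqrtGo (n lo hi : Int) : Int :=
  if _h : lo < hi then
    let mid := PySem.Int.floordiv (lo + hi + 1) 2
    if mid * mid ≤ n then blessIsqrtGo n mid hi else blessIsqrtGo n lo (mid - 1)
  else lo
termination_by (hi - lo).toNat
decreasing_by
  · have := PySem.Int.floordiv_two_mid_bounds (lo := lo + 1) (hi := hi) (by omega)
    have h2 : lo + 1 + hi = lo + hi + 1 := by ring
    rw [h2] at this
    omega
  · have := PySem.Int.floordiv_two_mid_bounds (lo := lo + 1) (hi := hi) (by omega)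
    have h2 : lo + 1 + hi = lo + hi + 1 := by ring
    rw [h2] at this
    omega

def blessIsqrt (n : Int) : Int := blessIsqrtGo n 0 n

-- the 'for d, c in zip(ds, cs)' loop of can, carrying num / ok (break = return true)
def blessInner (ds : List Int) (cs : List Bool) (num : Int) : Bool :=
  match ds, cs with
  | d :: ds', c :: cs' =>
    let num' := num * 10 + d
    if (0 < num' ∧ num' < 10 ^ 9 ∧ blessIsqrt num' * blessIsqrt num' = num') ∧ c = true then true
    else blessInner ds' cs' num'
  | _, _ => false

-- can(ds): suffix DP list [c_i, …, c_n]
def blessCan (ds : List Int) : List Bool :=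
  match ds with
  | [] => [true]
  | d :: ds' =>
    let cs := blessCan ds'
    blessInner (d :: ds') cs 0 :: cs

def bless_alt (A : Int) : String :=
  let digits := (PySem.Int.toChars A).map (fun c => (c.toNat : Int) - 48)
  if (blessCan digits).headD false then "Yes" else "No"

-- ===== PRECONDITION & SPEC =====
-- Pre_ excludes exactly A < 0: there str(A) starts with '-' and list(map(int, str(A)))
-- raises ValueError in both A and B.
def Pre_bless (A : Int) : Prop := 0 ≤ A
instance (A : Int) : Decidable (Pre_bless A) := by unfold Pre_bless; infer_instance
def pvWitness_bless : Int := (256)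

def Spec_bless (A : Int) (out : String) : Prop := out = bless_alt A
instance (A : Int) (out : String) : Decidable (Spec_bless A out) := by unfold Spec_bless; infer_instance

-- ===== CLAIM (what is proved, stated in full; the proofs are below) =====
def Claim_equal_bless : Prop := ∀ (A : Int), Dom_bless A → Pre_bless A → Spec_bless A (bless A)

-- ===== LEMMAS AND PROOFS =====

-- membership in A's square set: exactly the squares k*k (k ≥ i) below 10^9
theorem mem_blessSquares (i : Int) (acc : PySem.Set Int) (hi : 1 ≤ i) (m : Int) :
    m ∈ blessSquares i acc ↔ m ∈ acc ∨ ∃ k : Int, i ≤ k ∧ k * k < 10 ^ 9 ∧ m = k * k := by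
  induction i, acc using blessSquares.induct with
  | case1 i acc h ih =>
    rw [blessSquares]
    simp only [h, dite_true]
    rw [ih (by omega), PySem.Set.mem_add]
    constructor
    · rintro (⟨hm | he⟩ | ⟨k, hk1, hk2, hk3⟩)
      · exact Or.inl hm
      · exact Or.inr ⟨i, le_refl i, h, he⟩
      · exact Or.inr ⟨k, by omega, hk2, hk3⟩
    · rintro (hm | ⟨k, hk1, hk2, hk3⟩)
      · exact Or.inl (Or.inl hm)
      · rcases eq_or_lt_of_le hk1 with he | hlt
        · exact Or.inl (Or.inr (he ▸ hk3))
        · exact Or.inr ⟨k, by omega, hk2, hk3⟩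
  | case2 i acc h =>
    rw [blessSquares]
    simp only [h, dite_false]
    constructor
    · exact Or.inl
    · rintro (hm | ⟨k, hk1, hk2, hk3⟩)
      · exact hm
      · exfalso
        have : i * i ≤ k * k := by nlinarith
        omega

-- the binary search maintains lo*lo ≤ n < (hi+1)^2 and ends with lo = hi
theorem blessIsqrtGo_spec (n lo hi : Int) (h0 : 0 ≤ lo) (hlh : lo ≤ hi)
    (hlo : lo * lo ≤ n) (hhi : n < (hi + 1) * (hi + 1)) :
    0 ≤ blessIsqrtGo n lo hi ∧ blessIsqrtGo n lo hi * blessIsqrtGo n lo hi ≤ n ∧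
      n < (blessIsqrtGo n lo hi + 1) * (blessIsqrtGo n lo hi + 1) := by
  induction lo, hi using blessIsqrtGo.induct n with
  | case1 lo hi h mid hmid ih =>
    have hmd : mid = PySem.Int.floordiv (lo + hi + 1) 2 := rfl
    rw [hmd] at hmid ih
    have hb := PySem.Int.floordiv_two_mid_bounds (lo := lo + 1) (hi := hi) (by omega)
    have h2 : lo + 1 + hi = lo + hi + 1 := by ring
    rw [h2] at hb
    rw [blessIsqrtGo]
    simp only [h, dite_true, if_pos hmid]
    exact ih (by omega) (by omega) hmid hhi
  | case2 lo hi h mid hmid ih =>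
    have hmd : mid = PySem.Int.floordiv (lo + hi + 1) 2 := rfl
    rw [hmd] at hmid ih
    have hb := PySem.Int.floordiv_two_mid_bounds (lo := lo + 1) (hi := hi) (by omega)
    have h2 : lo + 1 + hi = lo + hi + 1 := by ring
    rw [h2] at hb
    rw [blessIsqrtGo]
    simp only [h, dite_true, if_neg hmid]
    refine ih h0 (by omega) hlo ?_
    have h3 : PySem.Int.floordiv (lo + hi + 1) 2 - 1 + 1 = PySem.Int.floordiv (lo + hi + 1) 2 := by ring
    rw [h3]
    omega
  | case3 lo hi h =>
    rw [blessIsqrtGo]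
    simp only [h, dite_false]
    have he : lo = hi := by omega
    subst he
    exact ⟨h0, hlo, hhi⟩

-- the binary search computes the floor square root
theorem blessIsqrt_spec (n : Int) (hn : 0 ≤ n) :
    0 ≤ blessIsqrt n ∧ blessIsqrt n * blessIsqrt n ≤ n ∧
      n < (blessIsqrt n + 1) * (blessIsqrt n + 1) :=
  blessIsqrtGo_spec n 0 n le_rfl hn (by simpa using hn) (by nlinarith)

-- B's square test names the same numbers as membership in A's set
theorem test_iff_sq (m : Int) :
    (0 < m ∧ m < 10 ^ 9 ∧ blessIsqrt m * blessIsqrt m = m) ↔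
      ∃ k : Int, 1 ≤ k ∧ k * k < 10 ^ 9 ∧ m = k * k := by
  constructor
  · rintro ⟨h1, h2, h3⟩
    obtain ⟨hr0, _, _⟩ := blessIsqrt_spec m (by omega)
    exact ⟨blessIsqrt m, by nlinarith, by omega, h3.symm⟩
  · rintro ⟨k, hk1, hk2, rfl⟩
    obtain ⟨hr0, hr1, hr2⟩ := blessIsqrt_spec (k * k) (by positivity)
    have hrk : blessIsqrt (k * k) = k := by nlinarith
    exact ⟨by nlinarith, hk2, by rw [hrk]⟩

theorem contains_eq_test (m : Int) :
    PySem.Set.contains (blessSquares 1 PySem.Set.empty) m =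
      decide (0 < m ∧ m < 10 ^ 9 ∧ blessIsqrt m * blessIsqrt m = m) := by
  rcases h : decide (0 < m ∧ m < 10 ^ 9 ∧ blessIsqrt m * blessIsqrt m = m) with _ | _
  · rw [decide_eq_false_iff_not] at h
    rw [← Bool.not_eq_true, PySem.Set.contains_iff, mem_blessSquares 1 _ le_rfl]
    rw [test_iff_sq] at h
    simp only [PySem.Set.empty, List.not_mem_nil, false_or]
    exact h
  · rw [decide_eq_true_eq] at h
    rw [PySem.Set.contains_iff, mem_blessSquares 1 _ le_rfl]
    exact Or.inr ((test_iff_sq m).mp h)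

-- the inner for-loop of dfs agrees with the zip loop of can, given agreement at later starts
theorem go_eq_inner (l : List Int) (d : Nat) : ∀ (j : Nat) (num : Int), l.length - j = d →
    j ≤ l.length →
    (∀ k, j < k → k ≤ l.length →
      blessDfs (blessSquares 1 PySem.Set.empty) l k = (blessCan (l.drop k)).headD false) →
    blessGo (blessSquares 1 PySem.Set.empty) l j num =
      blessInner (l.drop j) (blessCan (l.drop (j + 1))) num := by
  induction d with
  | zero =>
    intro j num hd hj _
    have hj' : j = l.length := by omega
    rw [blessGo]
    simp only [hj', lt_irrefl, dite_false]
    rw [List.drop_of_length_le (by omega)]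
    rfl
  | succ d ih =>
    intro j num hd hj H
    have hjl : j < l.length := by omega
    have hdfs := H (j + 1) (by omega) (by omega)
    have hgo := ih (j + 1) (num * 10 + l[j]) (by omega) (by omega)
      (fun k hk1 hk2 => H k (by omega) hk2)
    rw [blessGo, dif_pos hjl]
    dsimp only
    rw [List.drop_eq_getElem_cons hjl]
    rcases hcase : l.drop (j + 1) with _ | ⟨e, es⟩
    · -- j + 1 = l.length: both loops stop after this step
      have hd2 : l.drop (j + 2) = [] := List.drop_of_length_le
        (by have hl := congrArg List.length hcase; simp at hl; omega)
      rw [hcase] at hdfs hgo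
      rw [hd2] at hgo
      rw [contains_eq_test, hdfs, hgo]
      simp only [blessCan, List.headD, blessInner]
      simp
    · -- j + 1 < l.length: one matching step, then the two tails agree via ih
      have hes : l.drop (j + 2) = es := by
        have := List.drop_add_one_eq_tail_drop (l := l) (i := j + 1)
        rw [hcase] at this
        simpa using this
      rw [hcase] at hdfs hgo
      rw [hes] at hgo
      rw [contains_eq_test, hdfs, hgo]
      simp only [blessCan, List.headD, blessInner]
      simp


-- dfs(i) equals the DP bit for start index i
theorem dfs_eq_can (l : List Int) : ∀ (d : Nat) (i : Nat), i ≤ l.length → l.length - i = d →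
    blessDfs (blessSquares 1 PySem.Set.empty) l i = (blessCan (l.drop i)).headD false := by
  intro d
  induction d using Nat.strong_induction_on with
  | _ d IH =>
    intro i hi hd
    rw [blessDfs]
    by_cases he : l.length = i
    · simp only [he, if_true]
      rw [List.drop_of_length_le (by omega)]
      rfl
    · simp only [he, if_false]
      have hil : i < l.length := by omega
      have hgo := go_eq_inner l (l.length - i) i 0 rfl (by omega)
        (fun k hk1 hk2 => IH (l.length - k) (by omega) k hk2 rfl)
      rw [hgo, List.drop_eq_getElem_cons hil]
      simp only [blessCan, List.headD]

-- ===== VERDICT (by name: the statement is the Claim_ definition above) =====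
theorem bless_spec : Claim_equal_bless := by
  intro A _ _
  unfold Spec_bless bless bless_alt
  dsimp only
  rw [dfs_eq_can _ _ 0 (Nat.zero_le _) rfl, List.drop_zero]
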